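-- pv_equiv track=rewrite | github.com/protektiq/driftbuddy | src/driftbuddy/agent/explainer.py | parse_ai_response_for_fixes
-- ===== SOURCE A (Python) =====
-- from typing import Any, Dict, List, Optional
--
-- def parse_ai_response_for_fixes(ai_response: str, files: List[Dict]) -> List[str]:
--     """
--     Parse the AI response to extract specific fixes for each file.
--
--     Args:
--         ai_response: The AI-generated explanation
--         files: List of file findings
--
--     Returns:
--         List of fixes corresponding to each file
--     """
--     fixes = []
--
--     # Simple parsing logic - look for file-specific sections
--     lines = ai_response.split("\n")
--     current_fix = ""
--     in_fix_section = False
--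
--     for line in lines:
--         line = line.strip()
--
--         # Look for file-specific headers
--         if any(f"File:" in line and file.get("file_name", "") in line for file in files):
--             if current_fix:
--                 fixes.append(current_fix.strip())
--             current_fix = line + "\n"
--             in_fix_section = True
--         elif in_fix_section and line:
--             current_fix += line + "\n"
--         elif in_fix_section and not line:
--             # Empty line might indicate end of fix section
--             pass
--
--     # Add the last fix
--     if current_fix:
--         fixes.append(current_fix.strip())
--
--     # Ensure we have a fix for each file
--     while len(fixes) < len(files):
--         fixes.append("Specific fix not found in AI response")
--
--     return fixes[: len(files)]  # Ensure we don't have more fixes than files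
-- ===== SOURCE B (Python) =====
-- from typing import Any, Dict, List, Optional
--
--
-- def parse_ai_response_for_fixes(ai_response: str, files: List[Dict]) -> List[str]:
--     """Group the stripped lines into per-file sections with a nested scan:
--     skip to each header, collect that section's non-empty lines in an inner
--     loop, join them; then pad/truncate to len(files)."""
--     stripped = [line.strip() for line in ai_response.split("\n")]
--
--     def is_header(line):
--         return any("File:" in line and f.get("file_name", "") in line for f in files)
--
--     fixes = []
--     n = len(stripped)
--     i = 0
--     while i < n:
--         if not is_header(stripped[i]):
--             i += 1
--             continue
--         body = [stripped[i]]
--         i += 1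
--         while i < n and not is_header(stripped[i]):
--             if stripped[i]:
--                 body.append(stripped[i])
--             i += 1
--         fixes.append("\n".join(body).strip())
--     fixes += ["Specific fix not found in AI response"] * (len(files) - len(fixes))
--     return fixes[: len(files)]
-- ===== Notes on version B (the rewrite author's own statement) =====
-- stated objective: alternative
-- what changed: Replaces A's one-pass state machine (an in_fix_section flag plus incremental string concatenation into current_fix) by a nested-scan grouping: skip to each header line, collect that section's non-empty stripped lines into a list with an inner loop, join them once, then pad/truncate to len(files).
import Mathlib
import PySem

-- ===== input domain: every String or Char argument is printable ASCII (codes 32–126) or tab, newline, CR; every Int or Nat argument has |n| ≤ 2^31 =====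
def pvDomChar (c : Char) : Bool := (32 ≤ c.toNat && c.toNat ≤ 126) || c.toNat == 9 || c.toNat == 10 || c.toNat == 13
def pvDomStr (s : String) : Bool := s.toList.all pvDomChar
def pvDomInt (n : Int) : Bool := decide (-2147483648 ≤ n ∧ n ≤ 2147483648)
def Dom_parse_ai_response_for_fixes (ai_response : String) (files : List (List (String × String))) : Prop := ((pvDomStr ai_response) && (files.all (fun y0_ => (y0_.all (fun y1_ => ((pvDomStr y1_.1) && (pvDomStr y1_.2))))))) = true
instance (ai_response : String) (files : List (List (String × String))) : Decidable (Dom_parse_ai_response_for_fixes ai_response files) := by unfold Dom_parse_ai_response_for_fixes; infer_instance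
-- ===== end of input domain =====

-- B replaces A's one-pass flag-and-string-accumulator state machine by a nested-scan
-- grouping (skip to each header, collect the section's non-empty lines, join once);
-- objective: alternative decomposition, same cost. Proven: identical return values.

-- ===== PORT A =====
-- the header test, shared verbatim by both Pythons:
-- any("File:" in line and file.get("file_name", "") in line for file in files)
def pvIsHeader (files : List (List (String × String))) (line : String) : Bool :=
  files.any (fun f =>
    PySem.Str.isIn "File:" line &&
    PySem.Str.isIn (PySem.Dict.getD (PySem.Dict.mk f) "file_name" "") line)

-- A's loop body applied to the already-stripped line s; state = (fixes, current_fix, in_fix_section)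
def pvStepA' (files : List (List (String × String)))
    (st : List String × String × Bool) (s : String) : List String × String × Bool :=
  if pvIsHeader files s then
    ((if st.2.1 = "" then st.1 else st.1 ++ [PySem.Str.strip st.2.1]), s ++ "\n", true)
  else if st.2.2 = true ∧ s ≠ "" then
    (st.1, st.2.1 ++ s ++ "\n", st.2.2)
  else st  -- the remaining two Python branches (empty line in a section / before any header) both leave the state unchanged

-- A's loop body: line = line.strip(), then the branch chain above
def pvStepA (files : List (List (String × String)))
    (st : List String × String × Bool) (line : String) : List String × String × Bool :=
  pvStepA' files st (PySem.Str.strip line)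

def parse_ai_response_for_fixes (ai_response : String) (files : List (List (String × String))) : List String :=
  -- ai_response.split("\n"): sep ≠ "" so split? is always `some`
  let lines := (PySem.Str.split? ai_response "\n").getD []
  let st := lines.foldl (pvStepA files) ([], "", false)
  let fixes := if st.2.1 = "" then st.1 else st.1 ++ [PySem.Str.strip st.2.1]
  let fixes2 := pvPadA files.length fixes
  PySem.List.slice fixes2 none (some (files.length : Int))  -- fixes[: len(files)]
where
  -- while len(fixes) < len(files): fixes.append("Specific fix not found in AI response")
  pvPadA (n : Nat) (fixes : List String) : List String :=
    if fixes.length < n then pvPadA n (fixes ++ ["Specific fix not found in AI response"]) else fixes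
  termination_by n - fixes.length
  decreasing_by simp; omega

-- ===== PORT B =====
-- inner while loop: collect the non-empty lines of a section up to (excluding) the
-- next header; returns (body lines collected, remaining suffix = next header onwards)
def pvInnerB (files : List (List (String × String))) : List String → List String × List String
  | [] => ([], [])
  | l :: r =>
    if pvIsHeader files l then ([], l :: r)
    else
      let p := pvInnerB files r
      ((if l = "" then p.1 else l :: p.1), p.2)

theorem pvInnerB_length_le (files : List (List (String × String))) :
    ∀ r : List String, (pvInnerB files r).2.length ≤ r.length := by
  intro r
  induction r with
  | nil => simp [pvInnerB]
  | cons l r ih =>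
    by_cases h : pvIsHeader files l = true
    · simp [pvInnerB, h]
    · simp [pvInnerB, h]; omega

-- outer while loop over the (already stripped) lines, as recursion on the suffix
def pvOuterB (files : List (List (String × String))) : List String → List String
  | [] => []
  | l :: r =>
    if pvIsHeader files l then
      PySem.Str.strip (PySem.Str.join "\n" (l :: (pvInnerB files r).1))
        :: pvOuterB files (pvInnerB files r).2
    else pvOuterB files r
  termination_by ls => ls.length
  decreasing_by
  · exact Nat.lt_succ_of_le (pvInnerB_length_le files r)
  · simp

def parse_ai_response_for_fixes_alt (ai_response : String) (files : List (List (String × String))) : List String :=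
  -- stripped = [line.strip() for line in ai_response.split("\n")]; split? is `some` since sep ≠ ""
  let stripped := ((PySem.Str.split? ai_response "\n").getD []).map PySem.Str.strip
  let fixes := pvOuterB files stripped
  -- fixes += ["Specific fix not found in AI response"] * (len(files) - len(fixes))
  let padded := fixes ++ List.replicate (files.length - fixes.length) "Specific fix not found in AI response"
  padded.take files.length  -- fixes[: len(files)], len(files) ≥ 0

-- ===== PRECONDITION & SPEC =====
def Spec_parse_ai_response_for_fixes (ai_response : String) (files : List (List (String × String))) (out : List String) : Prop := out = parse_ai_response_for_fixes_alt ai_response files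
instance (ai_response : String) (files : List (List (String × String))) (out : List String) : Decidable (Spec_parse_ai_response_for_fixes ai_response files out) := by unfold Spec_parse_ai_response_for_fixes; infer_instance

-- ===== CLAIM (what is proved, stated in full; the proofs are below) =====
def Claim_equal_parse_ai_response_for_fixes : Prop := ∀ (ai_response : String) (files : List (List (String × String))), Dom_parse_ai_response_for_fixes ai_response files → Spec_parse_ai_response_for_fixes ai_response files (parse_ai_response_for_fixes ai_response files)

-- ===== LEMMAS AND PROOFS =====

-- A's current_fix after a header hd and body lines bd: "hd\n" + each body line + "\n"
def pvMk (hd : String) (bd : List String) : String :=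
  PySem.Str.join "\n" (hd :: bd) ++ "\n"

-- A's after-loop flush
def pvFinish (st : List String × String × Bool) : List String :=
  if st.2.1 = "" then st.1 else st.1 ++ [PySem.Str.strip st.2.1]

theorem pvRstrip_snoc_nl (l : List Char) :
    PySem.Chars.rstrip (l ++ ['\n']) = PySem.Chars.rstrip l := by
  simp [PySem.Chars.rstrip, List.dropWhile]
  rfl

theorem pvStrip_snoc_nl (s : String) :
    PySem.Str.strip (s ++ "\n") = PySem.Str.strip s := by
  rw [← String.toList_inj]
  rw [PySem.Str.toList_strip, PySem.Str.toList_strip, String.toList_append]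
  show PySem.Chars.strip (s.toList ++ ['\n']) = _
  simp only [PySem.Chars.strip]
  rcases h : PySem.Chars.lstrip s.toList with _ | ⟨c, cs⟩
  · -- s is all whitespace: lstrip of s ++ "\n" drops everything too
    have h2 : PySem.Chars.lstrip (s.toList ++ ['\n']) = [] := by
      simp only [PySem.Chars.lstrip] at h ⊢
      rw [List.dropWhile_append, h]
      simp [List.dropWhile]
      rfl
    rw [h2]
  · have h2 : PySem.Chars.lstrip (s.toList ++ ['\n']) = PySem.Chars.lstrip s.toList ++ ['\n'] := by
      simp only [PySem.Chars.lstrip] at h ⊢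
      rw [List.dropWhile_append, h]
      simp
    rw [h2, pvRstrip_snoc_nl, h]

theorem pvIntercalate_cons_cons (sep a b : List Char) (tl : List (List Char)) :
    sep.intercalate (a :: b :: tl) = a ++ sep ++ sep.intercalate (b :: tl) := by
  simp [List.intercalate]

theorem pvJoin_snoc (hd l : String) (bd : List String) :
    PySem.Str.join "\n" (hd :: (bd ++ [l])) = PySem.Str.join "\n" (hd :: bd) ++ "\n" ++ l := by
  induction bd generalizing hd with
  | nil =>
    rw [← String.toList_inj]
    simp [PySem.Str.toList_join, PySem.Chars.join, List.intercalate]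
  | cons b bs ih =>
    have ih' := congrArg String.toList (ih b)
    rw [← String.toList_inj]
    simp only [PySem.Str.toList_join, String.toList_append, PySem.Chars.join,
      List.map_cons, List.map_append, List.cons_append,
      pvIntercalate_cons_cons] at ih' ⊢
    rw [ih']
    simp [List.append_assoc]

theorem pvMk_ne_empty (hd : String) (bd : List String) : pvMk hd bd ≠ "" := by
  intro h
  have := congrArg String.toList h
  simp [pvMk, String.toList_append] at this

theorem pvMk_add (hd l : String) (bd : List String) :
    pvMk hd bd ++ l ++ "\n" = pvMk hd (bd ++ [l]) := by
  simp only [pvMk, pvJoin_snoc]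

theorem pvStrip_mk (hd : String) (bd : List String) :
    PySem.Str.strip (pvMk hd bd) = PySem.Str.strip (PySem.Str.join "\n" (hd :: bd)) := by
  simp only [pvMk, pvStrip_snoc_nl]

theorem pvMk_nil (l : String) : l ++ "\n" = pvMk l [] := by
  rw [← String.toList_inj]
  simp [pvMk, PySem.Str.toList_join, PySem.Chars.join, List.intercalate, String.toList_append]

-- the in-section invariant: from state (fx, pvMk hd bd, true), A finishes the current
-- section exactly as B's inner scan does, then continues at the next header
theorem pvL1 (files : List (List (String × String))) (r : List String) :
    ∀ (fx : List String) (hd : String) (bd : List String),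
    pvFinish (r.foldl (pvStepA' files) (fx, pvMk hd bd, true)) =
      fx ++ (PySem.Str.strip (PySem.Str.join "\n" (hd :: (bd ++ (pvInnerB files r).1)))
              :: pvOuterB files (pvInnerB files r).2) := by
  induction r with
  | nil =>
    intro fx hd bd
    simp [pvFinish, pvMk_ne_empty, pvInnerB, pvOuterB, pvStrip_mk]
  | cons l r ih =>
    intro fx hd bd
    by_cases hh : pvIsHeader files l = true
    · have hstep : pvStepA' files (fx, pvMk hd bd, true) l =
        (fx ++ [PySem.Str.strip (pvMk hd bd)], l ++ "\n", true) := by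
        simp [pvStepA', hh, pvMk_ne_empty]
      rw [List.foldl_cons, hstep, pvMk_nil l, ih]
      simp [pvInnerB, hh, pvOuterB, pvStrip_mk]
    · by_cases hl : l = ""
      · subst hl
        have hstep : pvStepA' files (fx, pvMk hd bd, true) "" = (fx, pvMk hd bd, true) := by
          simp [pvStepA', hh]
        rw [List.foldl_cons, hstep, ih]
        simp [pvInnerB, hh]
      · have hstep : pvStepA' files (fx, pvMk hd bd, true) l =
          (fx, pvMk hd (bd ++ [l]), true) := by
          simp [pvStepA', hh, hl, ← pvMk_add]
        rw [List.foldl_cons, hstep, ih]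
        simp [pvInnerB, hh, hl]
  
-- before any header, A's state machine idles; B skips
theorem pvL0 (files : List (List (String × String))) (ls : List String) :
    ∀ fx : List String,
    pvFinish (ls.foldl (pvStepA' files) (fx, "", false)) = fx ++ pvOuterB files ls := by
  induction ls with
  | nil => intro fx; simp [pvFinish, pvOuterB]
  | cons l r ih =>
    intro fx
    by_cases hh : pvIsHeader files l = true
    · have hstep : pvStepA' files (fx, "", false) l = (fx, l ++ "\n", true) := by
        simp [pvStepA', hh]
      rw [List.foldl_cons, hstep, pvMk_nil l, pvL1]
      simp [pvOuterB, hh]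
    · have hstep : pvStepA' files (fx, "", false) l = (fx, "", false) := by
        simp [pvStepA', hh]
      rw [List.foldl_cons, hstep, ih]
      simp [pvOuterB, hh]

-- A's pad-while-loop = B's replicate append
theorem pvPad_eq (n : Nat) (fixes : List String) :
    parse_ai_response_for_fixes.pvPadA n fixes =
      fixes ++ List.replicate (n - fixes.length) "Specific fix not found in AI response" := by
  rw [parse_ai_response_for_fixes.pvPadA]
  by_cases h : fixes.length < n
  · rw [if_pos h, pvPad_eq n (fixes ++ ["Specific fix not found in AI response"])]
    have h1 : n - fixes.length = (n - (fixes ++ ["Specific fix not found in AI response"]).length) + 1 := by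
      simp; omega
    rw [h1, List.replicate_succ]
    simp
  · rw [if_neg h]
    have h0 : n - fixes.length = 0 := by omega
    simp [h0]
termination_by n - fixes.length
decreasing_by simp; omega

-- ===== VERDICT (by name: the statement is the Claim_ definition above) =====
theorem parse_ai_response_for_fixes_spec : Claim_equal_parse_ai_response_for_fixes := by
  intro ai_response files _
  show parse_ai_response_for_fixes ai_response files = parse_ai_response_for_fixes_alt ai_response files
  simp only [parse_ai_response_for_fixes, parse_ai_response_for_fixes_alt]
  have hfold : ((PySem.Str.split? ai_response "\n").getD []).foldl (pvStepA files) ([], "", false)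
      = (((PySem.Str.split? ai_response "\n").getD []).map PySem.Str.strip).foldl
          (pvStepA' files) ([], "", false) := by
    rw [List.foldl_map]; rfl
  rw [hfold]
  have hcore := pvL0 files (((PySem.Str.split? ai_response "\n").getD []).map PySem.Str.strip) []
  simp only [pvFinish, List.nil_append] at hcore
  rw [hcore, pvPad_eq]
  rw [PySem.List.slice_to _ (Int.natCast_nonneg _), Int.toNat_natCast]
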